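-- pv_equiv track=rewrite | github.com/JacksenSE/videoAutomation | assets/broll.py | _find_suitable_video_file
-- ===== SOURCE A (Python) =====
-- from typing import List, Optional
--
-- def _find_suitable_video_file(video_files: List[dict]) -> Optional[dict]:
--     """Find the most suitable video file from Pexels response"""
--     # Prefer HD quality with reasonable file size
--     preferred_qualities = ['hd', 'sd']
--
--     for quality in preferred_qualities:
--         for file in video_files:
--             if (file.get('quality') == quality and
--                 file.get('file_type') == 'video/mp4'):
--                 return file
--
--     # Fallback to any mp4 file
--     for file in video_files:
--         if file.get('file_type') == 'video/mp4':
--             return file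
--
--     return None
-- ===== SOURCE B (Python) =====
-- def _find_suitable_video_file(video_files):
--     """Single pass: keep the earliest mp4 file of the best (lowest) quality rank."""
--     best_priority = 3
--     best_file = None
--     for file in video_files:
--         if file.get('file_type') != 'video/mp4':
--             continue
--         quality = file.get('quality')
--         priority = 0 if quality == 'hd' else 1 if quality == 'sd' else 2
--         if priority < best_priority:
--             best_priority = priority
--             best_file = file
--     return best_file
-- ===== Notes on version B (the rewrite author's own statement) =====
-- stated objective: simpler
-- what changed: Replaced A's three sequential scans (hd pass, sd pass, any-mp4 fallback) with one pass keeping the earliest mp4 at the best quality rank via a strict-less priority update.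
import Mathlib
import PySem

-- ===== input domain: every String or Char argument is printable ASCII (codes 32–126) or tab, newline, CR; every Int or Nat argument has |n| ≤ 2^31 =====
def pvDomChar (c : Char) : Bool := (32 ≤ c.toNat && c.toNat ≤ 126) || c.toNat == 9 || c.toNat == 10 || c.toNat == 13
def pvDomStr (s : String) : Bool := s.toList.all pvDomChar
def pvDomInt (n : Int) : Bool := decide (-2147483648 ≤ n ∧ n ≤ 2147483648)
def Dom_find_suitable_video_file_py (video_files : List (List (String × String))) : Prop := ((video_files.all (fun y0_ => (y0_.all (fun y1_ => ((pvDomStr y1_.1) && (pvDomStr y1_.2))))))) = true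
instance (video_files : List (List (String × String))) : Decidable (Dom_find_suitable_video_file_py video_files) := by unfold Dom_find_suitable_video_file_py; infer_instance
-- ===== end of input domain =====

-- B replaces A's three sequential scans by one pass keeping the earliest mp4 at the
-- best quality rank (objective: simpler).

-- dict.get(k): first-match lookup in the association list (shared by both ports)
def pvDGet (d : List (String × String)) (k : String) : Option String :=
  (d.find? (fun p => p.1 == k)).map (·.2)

-- ===== PORT A =====
def find_suitable_video_file_py (video_files : List (List (String × String))) : Option (List (String × String)) :=
  match ["hd", "sd"].findSome? (fun quality =>
      video_files.find? (fun file =>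
        pvDGet file "quality" == some quality && pvDGet file "file_type" == some "video/mp4")) with
  | some file => some file
  | none =>
      video_files.find? (fun file => pvDGet file "file_type" == some "video/mp4")

-- ===== PORT B =====
def pvAltStep (st : Nat × Option (List (String × String))) (file : List (String × String)) :
    Nat × Option (List (String × String)) :=
  if pvDGet file "file_type" != some "video/mp4" then st
  else
    let quality := pvDGet file "quality"
    let priority : Nat := if quality == some "hd" then 0 else if quality == some "sd" then 1 else 2
    if priority < st.1 then (priority, some file) else st

def find_suitable_video_file_py_alt (video_files : List (List (String × String))) : Option (List (String × String)) :=
  (video_files.foldl pvAltStep (3, none)).2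

-- ===== PRECONDITION & SPEC =====
def Spec_find_suitable_video_file_py (video_files : List (List (String × String))) (out : Option (List (String × String))) : Prop := out = find_suitable_video_file_py_alt video_files
instance (video_files : List (List (String × String))) (out : Option (List (String × String))) : Decidable (Spec_find_suitable_video_file_py video_files out) := by unfold Spec_find_suitable_video_file_py; infer_instance

-- ===== CLAIM (what is proved, stated in full; the proofs are below) =====
def Claim_equal_find_suitable_video_file_py : Prop := ∀ (video_files : List (List (String × String))), Dom_find_suitable_video_file_py video_files → Spec_find_suitable_video_file_py video_files (find_suitable_video_file_py video_files)

-- ===== LEMMAS AND PROOFS =====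

-- abbreviations for the three candidate predicates
def pvP0 (f : List (String × String)) : Bool :=
  pvDGet f "quality" == some "hd" && pvDGet f "file_type" == some "video/mp4"
def pvP1 (f : List (String × String)) : Bool :=
  pvDGet f "quality" == some "sd" && pvDGet f "file_type" == some "video/mp4"
def pvP2 (f : List (String × String)) : Bool :=
  pvDGet f "file_type" == some "video/mp4"

-- once the loop's best priority is 0, the state never changes
lemma pvLoop0 (t : List (List (String × String))) (f : List (String × String)) :
    t.foldl pvAltStep (0, some f) = (0, some f) := by
  induction t with
  | nil => rfl
  | cons g t ih =>
      simp only [List.foldl_cons]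
      have : pvAltStep (0, some f) g = (0, some f) := by
        unfold pvAltStep
        split
        · rfl
        · simp
      rw [this, ih]

-- from priority 1, only a later hd-mp4 file can replace the current best
lemma pvLoop1 (t : List (List (String × String))) (f : List (String × String)) :
    (t.foldl pvAltStep (1, some f)).2 =
      match t.find? pvP0 with
      | some g => some g
      | none => some f := by
  induction t generalizing f with
  | nil => rfl
  | cons g t ih =>
      simp only [List.foldl_cons, List.find?_cons]
      by_cases hm : pvDGet g "file_type" = some "video/mp4"
      · by_cases hq : pvDGet g "quality" = some "hd"
        · have h0 : pvP0 g = true := by simp [pvP0, hm, hq]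
          have hstep : pvAltStep (1, some f) g = (0, some g) := by
            unfold pvAltStep; simp [hm, hq]
          rw [hstep, h0, pvLoop0]
        · have h0 : pvP0 g = false := by simp [pvP0, hq]
          by_cases hq1 : pvDGet g "quality" = some "sd"
          · have hstep : pvAltStep (1, some f) g = (1, some f) := by
              unfold pvAltStep; simp [hm, hq1]
            rw [hstep, h0, ih]
          · have hstep : pvAltStep (1, some f) g = (1, some f) := by
              unfold pvAltStep; simp [hm, hq, hq1]
            rw [hstep, h0, ih]
      · have h0 : pvP0 g = false := by simp [pvP0, hm]
        have hstep : pvAltStep (1, some f) g = (1, some f) := by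
          unfold pvAltStep; simp [hm]
        rw [hstep, h0, ih]

-- from priority 2, a later hd- or sd-mp4 file can replace the current best
lemma pvLoop2 (t : List (List (String × String))) (f : List (String × String)) :
    (t.foldl pvAltStep (2, some f)).2 =
      match t.find? pvP0 with
      | some g => some g
      | none =>
          match t.find? pvP1 with
          | some g => some g
          | none => some f := by
  induction t generalizing f with
  | nil => rfl
  | cons g t ih =>
      simp only [List.foldl_cons, List.find?_cons]
      by_cases hm : pvDGet g "file_type" = some "video/mp4"
      · by_cases hq0 : pvDGet g "quality" = some "hd"
        · have h0 : pvP0 g = true := by simp [pvP0, hm, hq0]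
          have hstep : pvAltStep (2, some f) g = (0, some g) := by
            unfold pvAltStep; simp [hm, hq0]
          rw [hstep, h0, pvLoop0]
        · by_cases hq1 : pvDGet g "quality" = some "sd"
          · have h0 : pvP0 g = false := by simp [pvP0, hq0]
            have h1 : pvP1 g = true := by simp [pvP1, hm, hq1]
            have hstep : pvAltStep (2, some f) g = (1, some g) := by
              unfold pvAltStep; simp [hm, hq1]
            rw [hstep, h0, h1, pvLoop1]
          · have h0 : pvP0 g = false := by simp [pvP0, hq0]
            have h1 : pvP1 g = false := by simp [pvP1, hq1]
            have hstep : pvAltStep (2, some f) g = (2, some f) := by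
              unfold pvAltStep; simp [hm, hq0, hq1]
            rw [hstep, h0, h1, ih]
      · have h0 : pvP0 g = false := by simp [pvP0, hm]
        have h1 : pvP1 g = false := by simp [pvP1, hm]
        have hstep : pvAltStep (2, some f) g = (2, some f) := by
          unfold pvAltStep; simp [hm]
        rw [hstep, h0, h1, ih]

-- full characterisation of B's single pass from its initial state
lemma pvLoopTop (t : List (List (String × String))) :
    (t.foldl pvAltStep (3, none)).2 =
      match t.find? pvP0 with
      | some g => some g
      | none =>
          match t.find? pvP1 with
          | some g => some g
          | none => t.find? pvP2 := by
  induction t with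
  | nil => rfl
  | cons g t ih =>
      simp only [List.foldl_cons, List.find?_cons]
      by_cases hm : pvDGet g "file_type" = some "video/mp4"
      · have h2 : pvP2 g = true := by simp [pvP2, hm]
        by_cases hq0 : pvDGet g "quality" = some "hd"
        · have h0 : pvP0 g = true := by simp [pvP0, hm, hq0]
          have hstep : pvAltStep (3, none) g = (0, some g) := by
            unfold pvAltStep; simp [hm, hq0]
          rw [hstep, h0, pvLoop0]
        · by_cases hq1 : pvDGet g "quality" = some "sd"
          · have h0 : pvP0 g = false := by simp [pvP0, hq0]
            have h1 : pvP1 g = true := by simp [pvP1, hm, hq1]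
            have hstep : pvAltStep (3, none) g = (1, some g) := by
              unfold pvAltStep; simp [hm, hq1]
            rw [hstep, h0, h1, pvLoop1]
          · have h0 : pvP0 g = false := by simp [pvP0, hq0]
            have h1 : pvP1 g = false := by simp [pvP1, hq1]
            have hstep : pvAltStep (3, none) g = (2, some g) := by
              unfold pvAltStep; simp [hm, hq0, hq1]
            rw [hstep, h0, h1, h2, pvLoop2]
      · have h0 : pvP0 g = false := by simp [pvP0, hm]
        have h1 : pvP1 g = false := by simp [pvP1, hm]
        have h2 : pvP2 g = false := by simp [pvP2, hm]
        have hstep : pvAltStep (3, none) g = (3, none) := by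
          unfold pvAltStep; simp [hm]
        rw [hstep, h0, h1, h2, ih]

-- ===== VERDICT (by name: the statement is the Claim_ definition above) =====
theorem find_suitable_video_file_py_spec : Claim_equal_find_suitable_video_file_py := by
  intro vf _
  unfold Spec_find_suitable_video_file_py find_suitable_video_file_py find_suitable_video_file_py_alt
  rw [pvLoopTop]
  have e0 : (fun file => pvDGet file "quality" == some "hd" && pvDGet file "file_type" == some "video/mp4") = pvP0 := rfl
  have e1 : (fun file => pvDGet file "quality" == some "sd" && pvDGet file "file_type" == some "video/mp4") = pvP1 := rfl
  have e2 : (fun file => pvDGet file "file_type" == some "video/mp4") = pvP2 := rfl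
  simp only [List.findSome?_cons, List.findSome?_nil, e0, e1, e2]
  rcases h0 : vf.find? pvP0 with _ | g <;> rcases h1 : vf.find? pvP1 with _ | g' <;>
    simp
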